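-- pv_equiv track=rewrite | github.com/ghub-ayrtom/iot-samsung-anpr | utils.py | format_license_plate_text
-- ===== SOURCE A (Python) =====
-- char_to_int = {
--     'A': '4',
--     'B': '8',
--     'E': '3',
--     'O': '0',
--     'T': '7',
-- }
--
-- int_to_char = {
--     '0': 'O',
--     '3': 'E',
--     '4': 'A',
--     '7': 'T',
--     '8': 'B',
-- }
--
-- def format_license_plate_text(text):
--     license_plate_string = ''
--
--     mapping = {
--         0: int_to_char,
--         1: char_to_int,
--         2: char_to_int,
--         3: char_to_int,
--         4: int_to_char,
--         5: int_to_char,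
--         6: char_to_int,
--         7: char_to_int,
--         8: char_to_int,
--     }
--
--     if len(text) == 8:
--         for i in [0, 1, 2, 3, 4, 5, 6, 7]:
--             if text[i] in mapping[i].keys():
--                 license_plate_string += mapping[i][text[i]]
--             else:
--                 license_plate_string += text[i]
--
--     if len(text) == 9:
--         for i in [0, 1, 2, 3, 4, 5, 6, 7, 8]:
--             if text[i] in mapping[i].keys():
--                 license_plate_string += mapping[i][text[i]]
--             else:
--                 license_plate_string += text[i]
--
--     return license_plate_string
-- ===== SOURCE B (Python) =====
-- char_to_int = {
--     'A': '4',
--     'B': '8',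
--     'E': '3',
--     'O': '0',
--     'T': '7',
-- }
--
-- int_to_char = {
--     '0': 'O',
--     '3': 'E',
--     '4': 'A',
--     '7': 'T',
--     '8': 'B',
-- }
--
-- _INT_TO_CHAR_TABLE = str.maketrans(int_to_char)
-- _CHAR_TO_INT_TABLE = str.maketrans(char_to_int)
--
-- def format_license_plate_text(text):
--     if len(text) not in (8, 9):
--         return ''
--     # contiguous runs of identical mapping: [0:1] / [1:4] / [4:6] / [6:]
--     return (text[0:1].translate(_INT_TO_CHAR_TABLE)
--             + text[1:4].translate(_CHAR_TO_INT_TABLE)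
--             + text[4:6].translate(_INT_TO_CHAR_TABLE)
--             + text[6:].translate(_CHAR_TO_INT_TABLE))
-- ===== Notes on version B (the rewrite author's own statement) =====
-- stated objective: idiomatic
-- what changed: Replaced the per-index loop with dict-membership tests by a length guard plus four segment-wide str.translate calls over the contiguous runs of identical mapping (text[0:1], [1:4], [4:6], [6:]).
import Mathlib
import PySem

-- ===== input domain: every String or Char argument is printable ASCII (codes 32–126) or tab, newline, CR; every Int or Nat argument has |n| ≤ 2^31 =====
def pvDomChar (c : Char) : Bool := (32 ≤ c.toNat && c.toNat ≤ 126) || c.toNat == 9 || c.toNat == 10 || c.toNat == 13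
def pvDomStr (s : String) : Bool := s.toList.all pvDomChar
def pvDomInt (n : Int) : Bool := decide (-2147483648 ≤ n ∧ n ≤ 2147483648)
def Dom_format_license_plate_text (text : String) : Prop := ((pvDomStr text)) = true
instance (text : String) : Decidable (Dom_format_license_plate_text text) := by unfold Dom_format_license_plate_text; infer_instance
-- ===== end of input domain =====

-- B replaces the per-index loop with dict lookups by a length guard plus four
-- segment-wide translations over the contiguous runs of identical mapping (idiomatic).

-- ===== PORT A =====
def pvCharToInt : PySem.Dict Char Char :=
  PySem.Dict.ofList [('A', '4'), ('B', '8'), ('E', '3'), ('O', '0'), ('T', '7')]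

def pvIntToChar : PySem.Dict Char Char :=
  PySem.Dict.ofList [('0', 'O'), ('3', 'E'), ('4', 'A'), ('7', 'T'), ('8', 'B')]

def pvMapping : PySem.Dict Int (PySem.Dict Char Char) :=
  PySem.Dict.ofList [(0, pvIntToChar), (1, pvCharToInt), (2, pvCharToInt), (3, pvCharToInt),
                     (4, pvIntToChar), (5, pvIntToChar), (6, pvCharToInt), (7, pvCharToInt),
                     (8, pvCharToInt)]

-- one iteration of A's loop body (the indices iterated are always valid indices of text
-- and keys of pvMapping, so the none / missing-key fallbacks are unreachable)
def pvStepA (cs : List Char) (acc : List Char) (i : Int) : List Char :=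
  match PySem.List.pyGet? cs i with
  | some c =>
      let d := (pvMapping.get? i).getD PySem.Dict.empty
      if d.contains c then acc ++ [(d.get? c).getD c] else acc ++ [c]
  | none => acc

def format_license_plate_text (text : String) : String :=
  let cs := text.toList
  let r1 : List Char :=
    if cs.length = 8 then ([0, 1, 2, 3, 4, 5, 6, 7] : List Int).foldl (pvStepA cs) [] else []
  let r2 : List Char :=
    if cs.length = 9 then ([0, 1, 2, 3, 4, 5, 6, 7, 8] : List Int).foldl (pvStepA cs) r1 else r1
  String.ofList r2

-- ===== PORT B =====
-- str.translate with a one-char-to-one-char table: map each char through it, identity if absent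
def pvTrans (d : PySem.Dict Char Char) (s : List Char) : List Char :=
  s.map (fun c => (d.get? c).getD c)

def format_license_plate_text_alt (text : String) : String :=
  let cs := text.toList
  if cs.length ≠ 8 ∧ cs.length ≠ 9 then ""
  else
    String.ofList (pvTrans pvIntToChar (PySem.List.slice cs (some 0) (some 1))
      ++ pvTrans pvCharToInt (PySem.List.slice cs (some 1) (some 4))
      ++ pvTrans pvIntToChar (PySem.List.slice cs (some 4) (some 6))
      ++ pvTrans pvCharToInt (PySem.List.slice cs (some 6) none))

-- ===== PRECONDITION & SPEC =====
def Spec_format_license_plate_text (text : String) (out : String) : Prop := out = format_license_plate_text_alt text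
instance (text : String) (out : String) : Decidable (Spec_format_license_plate_text text out) := by unfold Spec_format_license_plate_text; infer_instance

-- ===== CLAIM (what is proved, stated in full; the proofs are below) =====
def Claim_equal_format_license_plate_text : Prop := ∀ (text : String), Dom_format_license_plate_text text → Spec_format_license_plate_text text (format_license_plate_text text)

-- ===== LEMMAS AND PROOFS =====

lemma pvLook_eq (d : PySem.Dict Char Char) (acc : List Char) (c : Char) :
    (if d.contains c then acc ++ [(d.get? c).getD c] else acc ++ [c])
      = acc ++ [(d.get? c).getD c] := by
  rw [PySem.Dict.contains_eq_isSome_get?]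
  cases h : d.get? c <;> simp_all

-- pvMapping at each iterated index
lemma pvM0 : pvMapping.get? 0 = some pvIntToChar := rfl
lemma pvM1 : pvMapping.get? 1 = some pvCharToInt := rfl
lemma pvM2 : pvMapping.get? 2 = some pvCharToInt := rfl
lemma pvM3 : pvMapping.get? 3 = some pvCharToInt := rfl
lemma pvM4 : pvMapping.get? 4 = some pvIntToChar := rfl
lemma pvM5 : pvMapping.get? 5 = some pvIntToChar := rfl
lemma pvM6 : pvMapping.get? 6 = some pvCharToInt := rfl
lemma pvM7 : pvMapping.get? 7 = some pvCharToInt := rfl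
lemma pvM8 : pvMapping.get? 8 = some pvCharToInt := rfl

-- A's loop body at a valid index whose mapping is known
lemma pvStepA_eq (cs acc : List Char) (i : Int) (c : Char) (d : PySem.Dict Char Char)
    (hg : PySem.List.pyGet? cs i = some c) (hm : pvMapping.get? i = some d) :
    pvStepA cs acc i = acc ++ [(d.get? c).getD c] := by
  simp [pvStepA, hg, hm, pvLook_eq]

lemma pvSlice8_01 (a b c d e f g h : Char) :
    PySem.List.slice [a,b,c,d,e,f,g,h] none (some 1) = [a] := by simp only [PySem.List.slice]; rfl
lemma pvSlice8_14 (a b c d e f g h : Char) :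
    PySem.List.slice [a,b,c,d,e,f,g,h] (some 1) (some 4) = [b,c,d] := by simp only [PySem.List.slice]; rfl
lemma pvSlice8_46 (a b c d e f g h : Char) :
    PySem.List.slice [a,b,c,d,e,f,g,h] (some 4) (some 6) = [e,f] := by simp only [PySem.List.slice]; rfl
lemma pvSlice8_6 (a b c d e f g h : Char) :
    PySem.List.slice [a,b,c,d,e,f,g,h] (some 6) none = [g,h] := by simp only [PySem.List.slice]; rfl
lemma pvSlice9_01 (a b c d e f g h i : Char) :
    PySem.List.slice [a,b,c,d,e,f,g,h,i] none (some 1) = [a] := by simp only [PySem.List.slice]; rfl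
lemma pvSlice9_14 (a b c d e f g h i : Char) :
    PySem.List.slice [a,b,c,d,e,f,g,h,i] (some 1) (some 4) = [b,c,d] := by simp only [PySem.List.slice]; rfl
lemma pvSlice9_46 (a b c d e f g h i : Char) :
    PySem.List.slice [a,b,c,d,e,f,g,h,i] (some 4) (some 6) = [e,f] := by simp only [PySem.List.slice]; rfl
lemma pvSlice9_6 (a b c d e f g h i : Char) :
    PySem.List.slice [a,b,c,d,e,f,g,h,i] (some 6) none = [g,h,i] := by simp only [PySem.List.slice]; rfl

lemma pvMain (text : String) :
    format_license_plate_text text = format_license_plate_text_alt text := by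
  unfold format_license_plate_text format_license_plate_text_alt
  generalize text.toList = cs
  rcases cs with _ | ⟨a, _ | ⟨b, _ | ⟨c, _ | ⟨d, _ | ⟨e, _ | ⟨f, _ | ⟨g, _ | ⟨h, rest⟩⟩⟩⟩⟩⟩⟩⟩
  · rfl
  · rfl
  · rfl
  · rfl
  · rfl
  · rfl
  · rfl
  · rfl
  rcases rest with _ | ⟨i, _ | ⟨j, rest'⟩⟩
  · -- length 8
    simp only [List.length_cons, List.length_nil]
    norm_num
    rw [pvSlice8_01, pvSlice8_14, pvSlice8_46, pvSlice8_6]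
    try simp only [List.foldl_cons, List.foldl_nil]
    rw [pvStepA_eq _ _ _ a _ rfl pvM0, pvStepA_eq _ _ _ b _ rfl pvM1,
        pvStepA_eq _ _ _ c _ rfl pvM2, pvStepA_eq _ _ _ d _ rfl pvM3,
        pvStepA_eq _ _ _ e _ rfl pvM4, pvStepA_eq _ _ _ f _ rfl pvM5,
        pvStepA_eq _ _ _ g _ rfl pvM6, pvStepA_eq _ _ _ h _ rfl pvM7]
    simp [pvTrans, ← String.ofList_append]
  · -- length 9
    simp only [List.length_cons, List.length_nil]
    norm_num
    rw [pvSlice9_01, pvSlice9_14, pvSlice9_46, pvSlice9_6]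
    try simp only [List.foldl_cons, List.foldl_nil]
    rw [pvStepA_eq _ _ _ a _ rfl pvM0, pvStepA_eq _ _ _ b _ rfl pvM1,
        pvStepA_eq _ _ _ c _ rfl pvM2, pvStepA_eq _ _ _ d _ rfl pvM3,
        pvStepA_eq _ _ _ e _ rfl pvM4, pvStepA_eq _ _ _ f _ rfl pvM5,
        pvStepA_eq _ _ _ g _ rfl pvM6, pvStepA_eq _ _ _ h _ rfl pvM7,
        pvStepA_eq _ _ _ i _ rfl pvM8]
    simp [pvTrans, ← String.ofList_append]
  · -- length ≥ 10
    simp only [List.length_cons]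
    rw [if_neg (by omega), if_neg (by omega), if_pos (by constructor <;> omega)]

-- ===== VERDICT (by name: the statement is the Claim_ definition above) =====
theorem format_license_plate_text_spec : Claim_equal_format_license_plate_text := by
  intro text _
  unfold Spec_format_license_plate_text
  exact pvMain text
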